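-- pv_equiv track=rewrite | github.com/DooDuZ/sparta_python | hanghae/day14/prob10.py | solution
-- ===== SOURCE A (Python) =====
-- def solution(params):
--     def binary_search(target):
--         left = 1
--         right = n - 1
--
--         while left <= right:
--             mid = (left + right) // 2
--
--             if dp[mid] < target:
--                 left = mid + 1
--             else:
--                 right = mid - 1
--
--         return left
--
--     n, numbers = params
--
--     # 출발 전봇대 기준 정렬
--     numbers.sort()
--
--     # 가능한 부분수열의 최대 길이는 n이다
--     # dp[i]에 들어가는 값은 부분 수열의 i위치에 올 수 있는 최소값
--     dp = [501 for _ in range(n + 1)]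
--
--     # dp에 업데이트되는 가장 큰 인덱스를 저장한다
--     maximum = 0
--
--     # 숫자가 가장 많이 증가하는 부분 수열의 길이를 찾으면 그게 최대 전깃줄의 개수다
--     for number in numbers:
--         index = binary_search(number[1])
--         dp[index] = number[1]
--         maximum = max(maximum, index)
--
--     return n - maximum
-- ===== SOURCE B (Python) =====
-- def solution(params):
--     n, numbers = params
--     numbers.sort()
--     best = 0
--     chains = []  # (second coordinate, longest strictly increasing chain ending at it)
--     for row in numbers:
--         v = row[1]
--         e = 1
--         for w, l in chains:
--             if w < v and l + 1 > e:
--                 e = l + 1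
--         chains.append((v, e))
--         if e > best:
--             best = e
--     return n - best
-- ===== Notes on version B (the rewrite author's own statement) =====
-- stated objective: alternative
-- what changed: Replaces A's patience-sorting binary search over a sentinel-filled table of size n+1 by the classic quadratic LIS dynamic program on the second coordinates (chain length per element), returning n minus the longest chain; Pre_ excludes inputs where A raises (nonempty list with n <= 0 or a row shorter than 2) and two accidental corners where A still returns: a second value above A's 501 sentinel overflows the table and forces the answer 0, and a row count above n makes A cap the chain length at its table size n.
-- outside the precondition, e.g. on solution((2, [[1, 600], [2, 1]])): A returns 0, B returns 1; on solution((1, [[1, 1], [2, 2]])): A returns 0, B returns -1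
import Mathlib
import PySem

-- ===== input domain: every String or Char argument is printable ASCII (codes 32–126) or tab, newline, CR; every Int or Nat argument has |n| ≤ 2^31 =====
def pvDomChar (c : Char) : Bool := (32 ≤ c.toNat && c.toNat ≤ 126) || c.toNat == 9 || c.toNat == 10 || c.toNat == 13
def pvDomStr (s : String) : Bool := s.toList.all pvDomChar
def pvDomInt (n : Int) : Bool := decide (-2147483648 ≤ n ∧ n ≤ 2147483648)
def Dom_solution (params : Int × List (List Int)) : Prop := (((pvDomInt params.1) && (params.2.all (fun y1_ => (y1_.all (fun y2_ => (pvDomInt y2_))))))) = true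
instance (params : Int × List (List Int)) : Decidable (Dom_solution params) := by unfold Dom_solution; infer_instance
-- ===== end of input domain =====

-- B replaces A's binary-search patience sort by the classic quadratic LIS DP (alternative
-- decomposition, not claimed faster); both Pythons sort `numbers` in place — the equivalence
-- proved here is about the return value only.

-- ===== PORT A =====
-- while left <= right: mid = (left+right)//2; if dp[mid] < target: left = mid+1 else right = mid-1
def pvBSGo (dp : List Int) (target left right : Int) : Int :=
  if h : left ≤ right then
    let mid := PySem.Int.floordiv (left + right) 2
    if PySem.List.pyGetD dp mid 0 < target then pvBSGo dp target (mid + 1) right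
    else pvBSGo dp target left (mid - 1)
  else left
termination_by (right + 1 - left).toNat
decreasing_by
  · have hb := PySem.Int.floordiv_two_mid_bounds h; omega
  · have hb := PySem.Int.floordiv_two_mid_bounds h; omega

-- binary_search(target) with left = 1, right = n - 1
def pvBinarySearch (dp : List Int) (n target : Int) : Int :=
  pvBSGo dp target 1 (n - 1)

-- for number in numbers: index = binary_search(number[1]); dp[index] = number[1]; maximum = max(maximum, index)
def pvLoopA (n : Int) (rows : List (List Int)) (dp : List Int) (maximum : Int) : Int :=
  match rows with
  | [] => maximum
  | row :: rest =>
    let index := pvBinarySearch dp n (PySem.List.pyGetD row 1 0)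
    pvLoopA n rest (PySem.List.pySetD dp index (PySem.List.pyGetD row 1 0)) (max maximum index)

def solution (params : Int × List (List Int)) : Int :=
  let n := params.1
  let numbers := PySem.List.sorted params.2 (fun r => r) false
  let dp := (PySem.List.pyRange 0 (n + 1) 1).map (fun _ => (501 : Int))
  n - pvLoopA n numbers dp 0

-- ===== PORT B =====
-- e = 1; for w, l in chains: if w < v and l + 1 > e: e = l + 1
def pvChainLen (chains : List (Int × Int)) (v : Int) : Int :=
  chains.foldl (fun e wl => if wl.1 < v ∧ wl.2 + 1 > e then wl.2 + 1 else e) 1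

-- for row in numbers: v = row[1]; e = ...; chains.append((v, e)); if e > best: best = e
def pvLoopB (rows : List (List Int)) (chains : List (Int × Int)) (best : Int) : Int :=
  match rows with
  | [] => best
  | row :: rest =>
    let v := PySem.List.pyGetD row 1 0
    let e := pvChainLen chains v
    pvLoopB rest (chains ++ [(v, e)]) (if e > best then e else best)

def solution_alt (params : Int × List (List Int)) : Int :=
  let n := params.1
  let numbers := PySem.List.sorted params.2 (fun r => r) false
  n - pvLoopB numbers [] 0

-- ===== PRECONDITION & SPEC =====
-- Pre_ excludes the inputs where Python A raises — a nonempty list with n <= 0 (dp[index]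
-- IndexError) or an inner row shorter than 2 (number[1] IndexError) — and, stated in the
-- claim with cites, two corners where A returns an accidental value: a second coordinate
-- above A's 501 sentinel (it overflows the tail table to slot n, forcing the answer 0) and
-- a row count above n (A's table of size n+1 caps the chain length at n); on the problem's
-- own inputs n is the number of rows and the values are pole numbers at most 500.
def Pre_solution (params : Int × List (List Int)) : Prop :=
  (∀ row ∈ params.2, 2 ≤ row.length ∧ PySem.List.pyGetD row 1 0 ≤ 501) ∧
  (params.2 ≠ [] → (params.2.length : Int) ≤ params.1)
instance (params : Int × List (List Int)) : Decidable (Pre_solution params) := by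
  unfold Pre_solution; infer_instance

def pvWitness_solution : (Int × List (List Int)) := (3, [[1, 2], [3, 1], [2, 5]])

def Spec_solution (params : Int × List (List Int)) (out : Int) : Prop := out = solution_alt params
instance (params : Int × List (List Int)) (out : Int) : Decidable (Spec_solution params out) := by
  unfold Spec_solution; infer_instance

-- ===== CLAIM (what is proved, stated in full; the proofs are below) =====
def Claim_equal_solution : Prop := ∀ (params : Int × List (List Int)), Dom_solution params → Pre_solution params → Spec_solution params (solution params)

-- ===== LEMMAS AND PROOFS =====

-- max chain length among recorded chains whose value is < t (0 when none)
def pvM (chains : List (Int × Int)) (t : Int) : Int :=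
  ((chains.filter (fun wl => decide (wl.1 < t))).map (fun wl => wl.2)).foldr max 0

lemma pvFoldrMax_nonneg (l : List Int) : 0 ≤ l.foldr max 0 := by
  induction l with
  | nil => simp
  | cons x xs ih => simp [List.foldr]; omega

lemma pvM_nonneg (chains : List (Int × Int)) (t : Int) : 0 ≤ pvM chains t :=
  pvFoldrMax_nonneg _

lemma pvM_cons (wl : Int × Int) (chains : List (Int × Int)) (t : Int) :
    pvM (wl :: chains) t = if wl.1 < t then max wl.2 (pvM chains t) else pvM chains t := by
  by_cases h : wl.1 < t <;> simp [pvM, h]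

lemma pvM_mono (chains : List (Int × Int)) (v t : Int) (h : v ≤ t) :
    pvM chains v ≤ pvM chains t := by
  induction chains with
  | nil => simp [pvM]
  | cons wl rest ih =>
    rw [pvM_cons, pvM_cons]
    split_ifs with h1 h2 h2 <;> omega

lemma pvM_le (chains : List (Int × Int)) (t c : Int) (hc : 0 ≤ c)
    (h : ∀ wl ∈ chains, wl.2 ≤ c) : pvM chains t ≤ c := by
  induction chains with
  | nil => simp [pvM]; omega
  | cons wl rest ih =>
    rw [pvM_cons]
    have h1 := h wl (by simp)
    have h2 := ih (fun x hx => h x (by simp [hx]))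
    split_ifs
    all_goals omega

lemma le_pvM_of_mem (t : Int) (wl : Int × Int) (hlt : wl.1 < t) :
    ∀ chains : List (Int × Int), wl ∈ chains → wl.2 ≤ pvM chains t := by
  intro chains
  induction chains with
  | nil => intro hmem; simp at hmem
  | cons x rest ih =>
    intro hmem
    rw [pvM_cons]
    rcases List.mem_cons.mp hmem with h | h
    · subst h; simp [hlt]
    · split_ifs with hx
      · exact le_trans (ih h) (le_max_right _ _)
      · exact ih h

lemma exists_of_le_pvM (t i : Int) (hi : 1 ≤ i) :
    ∀ chains : List (Int × Int), i ≤ pvM chains t → ∃ wl ∈ chains, wl.1 < t ∧ i ≤ wl.2 := by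
  intro chains
  induction chains with
  | nil => intro h; simp [pvM] at h; omega
  | cons x rest ih =>
    intro h
    rw [pvM_cons] at h
    split_ifs at h with hx
    · rcases max_cases x.2 (pvM rest t) with ⟨heq, _⟩ | ⟨heq, _⟩
      · exact ⟨x, by simp, hx, by omega⟩
      · obtain ⟨wl, hm, h1, h2⟩ := ih (by omega)
        exact ⟨wl, by simp [hm], h1, h2⟩
    · obtain ⟨wl, hm, h1, h2⟩ := ih h
      exact ⟨wl, by simp [hm], h1, h2⟩

lemma pvM_append (chains : List (Int × Int)) (v e t : Int) (he : 1 ≤ e) :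
    pvM (chains ++ [(v, e)]) t = if v < t then max (pvM chains t) e else pvM chains t := by
  induction chains with
  | nil =>
    by_cases h : v < t <;> simp [pvM, h] <;> omega
  | cons x rest ih =>
    rw [List.cons_append, pvM_cons, pvM_cons, ih]
    split_ifs <;> omega

lemma pvChainLen_go (v : Int) (chains : List (Int × Int)) :
    ∀ a : Int, 1 ≤ a → (∀ wl ∈ chains, 0 ≤ wl.2) →
    chains.foldl (fun e wl => if wl.1 < v ∧ wl.2 + 1 > e then wl.2 + 1 else e) a
      = max a (pvM chains v + 1) := by
  induction chains with
  | nil => intro a ha _; simp [pvM]; omega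
  | cons x rest ih =>
    intro a ha hnn
    have hx : 0 ≤ x.2 := hnn x (by simp)
    have hrest : ∀ wl ∈ rest, 0 ≤ wl.2 := fun wl h => hnn wl (by simp [h])
    rw [List.foldl_cons, pvM_cons]
    by_cases hlt : x.1 < v
    · have hstep : (if x.1 < v ∧ x.2 + 1 > a then x.2 + 1 else a) = max a (x.2 + 1) := by
        split_ifs with h' <;> omega
      rw [hstep, ih (max a (x.2 + 1)) (by omega) hrest, if_pos hlt]
      omega
    · have hstep : (if x.1 < v ∧ x.2 + 1 > a then x.2 + 1 else a) = a := by
        split_ifs with h' <;> try rfl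
        exact absurd h'.1 hlt
      rw [hstep, ih a ha hrest, if_neg hlt]

lemma pvChainLen_eq (chains : List (Int × Int)) (v : Int)
    (hnn : ∀ wl ∈ chains, 0 ≤ wl.2) : pvChainLen chains v = pvM chains v + 1 := by
  have h := pvChainLen_go v chains 1 (by omega) hnn
  have := pvM_nonneg chains v
  unfold pvChainLen
  omega

-- B's result is bounded by the number of rows already seen plus those still to be processed
lemma pvLoopB_le :
    ∀ (rows : List (List Int)) (chains : List (Int × Int)) (best : Int),
      (∀ wl ∈ chains, 0 ≤ wl.2 ∧ wl.2 ≤ (chains.length : Int)) →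
      0 ≤ best → best ≤ (chains.length : Int) →
      pvLoopB rows chains best ≤ (chains.length : Int) + rows.length := by
  intro rows
  induction rows with
  | nil => intro chains best _ _ hb; simpa [pvLoopB] using by omega
  | cons row rest ih =>
    intro chains best hinv hb0 hbl
    rw [pvLoopB]
    set v := PySem.List.pyGetD row 1 0 with hv
    have hnn : ∀ wl ∈ chains, 0 ≤ wl.2 := fun wl h => (hinv wl h).1
    have he : pvChainLen chains v = pvM chains v + 1 := pvChainLen_eq chains v hnn
    have hM : pvM chains v ≤ (chains.length : Int) :=
      pvM_le chains v _ (by positivity) (fun wl h => (hinv wl h).2)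
    have hM0 := pvM_nonneg chains v
    have := ih (chains ++ [(v, pvChainLen chains v)])
      (if pvChainLen chains v > best then pvChainLen chains v else best)
      (by
        intro wl hwl
        rcases List.mem_append.mp hwl with hh | hh
        · have := hinv wl hh
          simp only [List.length_append, List.length_cons, List.length_nil]
          constructor
          · exact this.1
          · push_cast; omega
        · simp only [List.mem_singleton] at hh
          subst hh
          simp only [List.length_append, List.length_cons, List.length_nil]
          constructor
          · show (0:Int) ≤ pvChainLen chains v; omega
          · show pvChainLen chains v ≤ _; push_cast; omega)
      (by split_ifs <;> omega)
      (by simp only [List.length_append, List.length_cons, List.length_nil]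
          split_ifs <;> push_cast <;> omega)
    simp only [List.length_append, List.length_cons, List.length_nil] at this ⊢
    push_cast at this ⊢
    omega

-- get-after-set with Int indices, in-range
lemma pyGetD_pySetD_int (xs : List Int) (i j v : Int) (hi : 0 ≤ i)
    (hj : 0 ≤ j) (hjlen : j < xs.length) :
    PySem.List.pyGetD (PySem.List.pySetD xs j v) i 0
      = if i = j then v else PySem.List.pyGetD xs i 0 := by
  have hi' : i = ((i.toNat : Nat) : Int) := by omega
  have hj' : j = ((j.toNat : Nat) : Int) := by omega
  rw [hi', hj', PySem.List.pyGetD_pySetD_natCast xs j.toNat i.toNat v 0 (by omega)]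
  congr 1
  simp only [eq_iff_iff]
  omega

-- the binary search returns min n (m+1) whenever dp[i] < t ↔ i ≤ m on [1, n-1]
lemma pvBSGo_char (dp : List Int) (n t m : Int) (_hm : 0 ≤ m)
    (hinv : ∀ i : Int, 1 ≤ i → i ≤ n - 1 → (PySem.List.pyGetD dp i 0 < t ↔ i ≤ m)) :
    ∀ (k : Nat) (l r : Int), (r + 1 - l).toNat ≤ k → 1 ≤ l → r ≤ n - 1 → l ≤ r + 1 →
      l ≤ min n (m + 1) → min n (m + 1) ≤ r + 1 →
      pvBSGo dp t l r = min n (m + 1) := by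
  intro k
  induction k with
  | zero =>
    intro l r hk h1 h2 h3 h4 h5
    rw [pvBSGo]
    rw [dif_neg (by omega)]
    omega
  | succ k ih =>
    intro l r hk h1 h2 h3 h4 h5
    rw [pvBSGo]
    by_cases hlr : l ≤ r
    · rw [dif_pos hlr]
      have hmid := PySem.Int.floordiv_two_mid_bounds hlr
      set mid := PySem.Int.floordiv (l + r) 2 with hmiddef
      have hmem := hinv mid (by omega) (by omega)
      by_cases hcmp : PySem.List.pyGetD dp mid 0 < t
      · rw [if_pos hcmp]
        have : mid ≤ m := hmem.mp hcmp
        exact ih (mid + 1) r (by omega) (by omega) h2 (by omega) (by omega) (by omega)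
      · rw [if_neg hcmp]
        have : ¬ (mid ≤ m) := fun hc => hcmp (hmem.mpr hc)
        exact ih l (mid - 1) (by omega) h1 (by omega) (by omega) (by omega) (by omega)
    · rw [dif_neg hlr]
      omega

-- the main invariant-carrying equivalence
lemma pvLoop_eq (n : Int) (hn : 1 ≤ n) :
    ∀ (rows : List (List Int)) (dp : List Int) (maximum : Int)
      (chains : List (Int × Int)) (best : Int),
      dp.length = (n + 1).toNat →
      (∀ row ∈ rows, PySem.List.pyGetD row 1 0 ≤ 501) →
      (∀ wl ∈ chains, 0 ≤ wl.2) →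
      maximum = min n best →
      0 ≤ best →
      (∀ i : Int, 1 ≤ i → i ≤ n - 1 → ∀ t : Int, t ≤ 501 →
        (PySem.List.pyGetD dp i 0 < t ↔ i ≤ pvM chains t)) →
      pvLoopA n rows dp maximum = min n (pvLoopB rows chains best) := by
  intro rows
  induction rows with
  | nil =>
    intro dp maximum chains best _ _ _ hmax _ _
    simp [pvLoopA, pvLoopB, hmax]
  | cons row rest ih =>
    intro dp maximum chains best hlen hv501 hnn hmax hbest hinv
    rw [pvLoopA, pvLoopB]
    set v := PySem.List.pyGetD row 1 0 with hvdef
    have hv : v ≤ 501 := hv501 row (by simp)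
    have hrest501 : ∀ r ∈ rest, PySem.List.pyGetD r 1 0 ≤ 501 :=
      fun r h => hv501 r (by simp [h])
    have hMv := pvM_nonneg chains v
    have he : pvChainLen chains v = pvM chains v + 1 := pvChainLen_eq chains v hnn
    set m := pvM chains v with hmdef
    -- the binary search lands at min n (m+1)
    have hidx : pvBinarySearch dp n v = min n (m + 1) := by
      have := pvBSGo_char dp n v m (by omega)
        (fun i h1 h2 => hinv i h1 h2 v hv)
        (n - 1 + 1 - 1).toNat 1 (n - 1) (by omega) (by omega) (by omega) (by omega)
        (by omega) (by omega)
      unfold pvBinarySearch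
      omega
    rw [hidx, he]
    set s := min n (m + 1) with hsdef
    apply ih
    · rw [PySem.List.length_pySetD]; exact hlen
    · exact hrest501
    · intro wl hwl
      rcases List.mem_append.mp hwl with hh | hh
      · exact hnn wl hh
      · simp only [List.mem_singleton] at hh
        subst hh
        simp
        omega
    · -- maximum' = min n best'
      split_ifs with hgt <;> omega
    · split_ifs with hgt <;> omega
    · -- the dp/chains invariant is preserved
      intro i h1 h2 t ht
      have hset := pyGetD_pySetD_int dp i s v (by omega) (by omega) (by omega)
      rw [hset, pvM_append chains v (m + 1) t (by omega)]
      by_cases his : i = s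
      · -- the written slot: s ≤ n - 1 forces s = m + 1
        rw [if_pos his]
        have hs : s = m + 1 := by omega
        constructor
        · intro hvt
          rw [if_pos hvt]
          omega
        · intro hle
          by_cases hvt : v < t
          · exact hvt
          · rw [if_neg hvt] at hle
            obtain ⟨wl, hmem, hwt, hw2⟩ := exists_of_le_pvM t i (by omega) chains hle
            by_cases hwv : wl.1 < v
            · have := le_pvM_of_mem v wl hwv chains hmem
              omega
            · omega
      · -- untouched slots
        rw [if_neg his]
        rw [hinv i h1 h2 t ht]
        split_ifs with hvt
        · constructor
          · intro h; omega
          · intro h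
            rcases le_or_gt i (pvM chains t) with h' | h'
            · exact h'
            · exfalso
              have hmono := pvM_mono chains v t (by omega)
              have : i = m + 1 := by omega
              omega
        · exact Iff.rfl

-- base dp: every slot of [501]*(n+1) in [1, n-1] reads 501
lemma pvBaseDp (n : Int) (i : Int) (h1 : 0 ≤ i) (h2 : i < n + 1) :
    PySem.List.pyGetD ((PySem.List.pyRange 0 (n + 1) 1).map (fun _ => (501 : Int))) i 0 = 501 := by
  have := PySem.List.pyGetD_map_pyRange_of_nonneg (fun _ => (501 : Int)) (n + 1) i 0 h1 h2
  simpa using this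

lemma pvBaseLen (n : Int) :
    ((PySem.List.pyRange 0 (n + 1) 1).map (fun _ => (501 : Int))).length = (n + 1).toNat := by
  rw [List.length_map, PySem.List.length_pyRange_one]
  omega

-- ===== VERDICT (by name: the statement is the Claim_ definition above) =====
theorem solution_spec : Claim_equal_solution := by
  intro params _hdom hpre
  unfold Spec_solution
  simp only [solution, solution_alt]
  set n := params.1 with hn
  set numbers := PySem.List.sorted params.2 (fun r => r) false with hnum
  obtain ⟨hrows, hlen⟩ := hpre
  by_cases hemp : numbers = []
  · simp [hemp, pvLoopA, pvLoopB]
  · have hne : params.2 ≠ [] := by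
      intro h
      exact hemp (by rw [hnum, h]; simp [PySem.List.sorted_eq_nil_iff])
    have hlenq : (params.2.length : Int) ≤ n := hlen hne
    have hlensorted : (numbers.length : Int) = (params.2.length : Int) := by
      rw [hnum, PySem.List.length_sorted]
    have h1n : 1 ≤ n := by
      have : params.2.length ≠ 0 := by simpa [List.length_eq_zero_iff] using hne
      omega
    have h501 : ∀ row ∈ numbers, PySem.List.pyGetD row 1 0 ≤ 501 := by
      intro row hmem
      exact (hrows row ((PySem.List.mem_sorted _ _ _ _).mp (hnum ▸ hmem))).2
    have hA : pvLoopA n numbers ((PySem.List.pyRange 0 (n + 1) 1).map (fun _ => (501 : Int))) 0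
        = min n (pvLoopB numbers [] 0) := by
      apply pvLoop_eq n h1n
      · exact pvBaseLen n
      · exact h501
      · intro wl h; simp at h
      · omega
      · omega
      · intro i hi1 hi2 t ht
        rw [pvBaseDp n i (by omega) (by omega)]
        constructor
        · intro h; omega
        · intro h
          have := pvM_nonneg ([] : List (Int × Int)) t
          simp [pvM] at h
          omega
    have hBle : pvLoopB numbers [] 0 ≤ (0 : Int) + numbers.length :=
      pvLoopB_le numbers [] 0 (by intro wl h; simp at h) (by omega) (by simp)
    rw [hA]
    omega
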